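-- pv_equiv track=rewrite | github.com/janezaletskaya/algorithms | algorithm_training_2024/week3/J_additional.py | slow_count_inc
-- ===== SOURCE A (Python) =====
-- from itertools import chain, combinations, permutations
--
-- def slow_count_inc(lst):
--     all_perms = list(permutations(lst))
--
--     min_inc = float('inf')
--     for perm in all_perms:
--         max_diff = 0
--         for i in range(1, len(perm)):
--             curr_diff = abs(perm[i][0] - perm[i - 1][0])
--             max_diff = max(max_diff, curr_diff)
--
--         min_inc = min(min_inc, max_diff)
--
--     return min_inc
-- ===== SOURCE B (Python) =====
-- def slow_count_inc(lst):
--     s = sorted(x[0] for x in lst)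
--     best = 0
--     for a, b in zip(s, s[1:]):
--         best = max(best, b - a)
--     return best
-- ===== Notes on version B (the rewrite author's own statement) =====
-- stated objective: faster
-- what changed: Instead of enumerating all n! permutations and minimising the maximum adjacent first-coordinate gap, B sorts the first coordinates once and returns the maximum consecutive difference of the sorted values, which equals that minimum.
-- outside the precondition, e.g. on slow_count_inc([[]]): A returns 0, B raises IndexError
import Mathlib
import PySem

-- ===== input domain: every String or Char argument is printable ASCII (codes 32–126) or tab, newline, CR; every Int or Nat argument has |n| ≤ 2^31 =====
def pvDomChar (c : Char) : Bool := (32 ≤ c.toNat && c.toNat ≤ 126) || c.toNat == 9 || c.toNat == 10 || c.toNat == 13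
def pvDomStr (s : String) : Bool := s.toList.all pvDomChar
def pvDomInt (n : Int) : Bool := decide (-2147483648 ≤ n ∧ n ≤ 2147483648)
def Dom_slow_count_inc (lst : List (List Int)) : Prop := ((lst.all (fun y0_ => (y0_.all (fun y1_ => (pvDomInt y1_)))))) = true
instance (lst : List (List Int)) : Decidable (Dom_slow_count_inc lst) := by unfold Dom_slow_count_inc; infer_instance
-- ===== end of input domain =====

-- B replaces A's O(n!·n) scan of all permutations by one sort of the first coordinates and a
-- single pass over consecutive differences (the minimum over permutations of the maximum
-- adjacent gap is the maximum consecutive gap of the sorted values); objective: faster.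

-- ===== PORT A =====
-- float('inf') is modelled by `none` (min(inf, x) = x); permutations of any list is nonempty,
-- so the final accumulator is always `some` and `.getD 0` never supplies its default.
-- The `.getD []` / `pyGetD _ 0 0` defaults are the IndexError cases excluded by Pre_.
def slow_count_inc (lst : List (List Int)) : Int :=
  let all_perms := PySem.List.permutations lst lst.length
  let r := all_perms.foldl (fun (min_inc : Option Int) (perm : List (List Int)) =>
      let max_diff := (PySem.List.pyRange 1 (perm.length : Int) 1).foldl
        (fun (max_diff : Int) (i : Int) =>
          let curr_diff := |PySem.List.pyGetD (PySem.List.pyGetD perm i []) 0 0 -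
                            PySem.List.pyGetD (PySem.List.pyGetD perm (i - 1) []) 0 0|
          max max_diff curr_diff) 0
      some (match min_inc with
            | none => max_diff
            | some m => min m max_diff)) none
  r.getD 0

-- ===== PORT B =====
def slow_count_inc_alt (lst : List (List Int)) : Int :=
  let s := PySem.List.sorted (lst.map (fun x => PySem.List.pyGetD x 0 0)) (fun v => v) false
  (s.zip s.tail).foldl (fun best ab => max best (ab.2 - ab.1)) 0

-- ===== PRECONDITION & SPEC =====
-- Pre_ excludes lists containing an empty sublist: there Python A raises IndexError on x[0]
-- whenever len(lst) ≥ 2 (and B's sort key x[0] raises even for len(lst) ≤ 1, where A still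
-- returns 0 without ever indexing).
def Pre_slow_count_inc (lst : List (List Int)) : Prop := ∀ x ∈ lst, x ≠ []
instance (lst : List (List Int)) : Decidable (Pre_slow_count_inc lst) := by
  unfold Pre_slow_count_inc; infer_instance
def pvWitness_slow_count_inc : List (List Int) := [[3, 1], [7], [4, 2]]

def Spec_slow_count_inc (lst : List (List Int)) (out : Int) : Prop := out = slow_count_inc_alt lst
instance (lst : List (List Int)) (out : Int) : Decidable (Spec_slow_count_inc lst out) := by
  unfold Spec_slow_count_inc; infer_instance

-- ===== CLAIM (what is proved, stated in full; the proofs are below) =====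
def Claim_equal_slow_count_inc : Prop := ∀ (lst : List (List Int)), Dom_slow_count_inc lst → Pre_slow_count_inc lst → Spec_slow_count_inc lst (slow_count_inc lst)

-- ===== LEMMAS AND PROOFS =====

-- first coordinate of a row, with the (excluded-by-Pre_) default 0
def pvFirst (x : List Int) : Int := PySem.List.pyGetD x 0 0

-- maximum absolute adjacent difference, phrased on adjacent pairs
def pvAmax (l : List Int) : Int :=
  (l.zip l.tail).foldl (fun m ab => max m |ab.2 - ab.1|) 0

-- the same quantity phrased on indices, as A's inner loop computes it
def pvIdx (l : List Int) : Int :=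
  (PySem.List.pyRange 1 (l.length : Int) 1).foldl
    (fun m i => max m |PySem.List.pyGetD l i 0 - PySem.List.pyGetD l (i - 1) 0|) 0

-- A's inner loop as a function of the permutation
def pvG (perm : List (List Int)) : Int :=
  (PySem.List.pyRange 1 (perm.length : Int) 1).foldl
    (fun (max_diff : Int) (i : Int) =>
      let curr_diff := |PySem.List.pyGetD (PySem.List.pyGetD perm i []) 0 0 -
                        PySem.List.pyGetD (PySem.List.pyGetD perm (i - 1) []) 0 0|
      max max_diff curr_diff) 0

-- A's outer loop step (min with the running `Option Int` minimum; none = inf)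
def pvStep (acc : Option Int) (perm : List (List Int)) : Option Int :=
  some (match acc with
        | none => pvG perm
        | some m => min m (pvG perm))

theorem pvFirst_pyGetD (perm : List (List Int)) (i : Int) :
    PySem.List.pyGetD (perm.map pvFirst) i 0 = pvFirst (PySem.List.pyGetD perm i []) := by
  have h := PySem.List.pyGetD_map pvFirst perm i []
  simpa [pvFirst] using h

theorem pvG_eq_pvIdx (perm : List (List Int)) : pvG perm = pvIdx (perm.map pvFirst) := by
  unfold pvG pvIdx
  rw [List.length_map]
  exact (PySem.List.foldl_congr_mem _ _ _ _ (fun acc i _ => by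
    rw [pvFirst_pyGetD, pvFirst_pyGetD]; rfl)).symm

-- walk formulation of pvAmax
def pvWalk (prev acc : Int) : List Int → Int
  | [] => acc
  | b :: t => pvWalk b (max acc |b - prev|) t

theorem pvWalk_zip (t : List Int) : ∀ (a acc : Int),
    ((a :: t).zip t).foldl (fun m ab => max m |ab.2 - ab.1|) acc = pvWalk a acc t := by
  induction t with
  | nil => intro a acc; rfl
  | cons b t' ih => intro a acc; simp only [List.zip_cons_cons, List.foldl_cons]; exact ih b _

theorem pvAmax_cons (a : Int) (t : List Int) : pvAmax (a :: t) = pvWalk a 0 t := by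
  unfold pvAmax
  simpa using pvWalk_zip t a 0

theorem pvWalk_snoc (t : List Int) : ∀ (prev acc x : Int),
    pvWalk prev acc (t ++ [x]) = max (pvWalk prev acc t) |x - t.getLastD prev| := by
  induction t with
  | nil => intro prev acc x; rfl
  | cons b t' ih => intro prev acc x; simp only [List.cons_append, pvWalk, List.getLastD_cons]
                    exact ih b _ x

theorem pvAmax_snoc (l : List Int) (x : Int) (h : l ≠ []) :
    pvAmax (l ++ [x]) = max (pvAmax l) |x - l.getLastD 0| := by
  cases l with
  | nil => exact absurd rfl h
  | cons a t =>
      rw [List.cons_append, pvAmax_cons, pvAmax_cons, pvWalk_snoc, List.getLastD_cons]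

theorem pvGetLastD_eq (l : List Int) (h : l ≠ []) (hlt : l.length - 1 < l.length) :
    l.getLastD 0 = l[l.length - 1] := by
  rw [List.getLastD_eq_getLast?, List.getLast?_eq_some_getLast h, Option.getD_some,
      List.getLast_eq_getElem]

theorem pvIdx_snoc (l : List Int) (x : Int) (h : l ≠ []) :
    pvIdx (l ++ [x]) = max (pvIdx l) |x - l.getLastD 0| := by
  have hlen : 1 ≤ l.length := List.length_pos_iff.2 h
  unfold pvIdx
  have hcast : ((l ++ [x]).length : Int) = (l.length : Int) + 1 := by
    simp
  rw [hcast, PySem.List.pyRange_one_succ_right (by exact_mod_cast hlen), List.foldl_append]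
  have hpre : ∀ (j : Int), 0 ≤ j → j < (l.length : Int) →
      PySem.List.pyGetD (l ++ [x]) j 0 = PySem.List.pyGetD l j 0 := by
    intro j hj0 hjl
    have hj' : j < ((l ++ [x]).length : Int) := by simp; omega
    rw [PySem.List.pyGetD_eq_getElem _ _ hj0 hj', PySem.List.pyGetD_eq_getElem _ _ hj0 hjl]
    exact List.getElem_append_left (by omega)
  have hbody : ∀ (acc : Int), ∀ i ∈ PySem.List.pyRange 1 (l.length : Int) 1,
      max acc |PySem.List.pyGetD (l ++ [x]) i 0 - PySem.List.pyGetD (l ++ [x]) (i - 1) 0| =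
      max acc |PySem.List.pyGetD l i 0 - PySem.List.pyGetD l (i - 1) 0| := by
    intro acc i hi
    rcases (PySem.List.mem_pyRange_one).1 hi with ⟨h1, h2⟩
    rw [hpre i (by omega) h2, hpre (i - 1) (by omega) (by omega)]
  rw [PySem.List.foldl_congr_mem _ _ _ _ hbody]
  simp only [List.foldl_cons, List.foldl_nil]
  congr 1
  have hxa : PySem.List.pyGetD (l ++ [x]) (l.length : Int) 0 = x := by
    rw [PySem.List.pyGetD_eq_getElem _ _ (by positivity) (by simp)]
    simp
  have hxb : PySem.List.pyGetD (l ++ [x]) ((l.length : Int) - 1) 0 = l.getLastD 0 := by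
    have h0 : (0 : Int) ≤ (l.length : Int) - 1 := by omega
    have h1 : (l.length : Int) - 1 < ((l ++ [x]).length : Int) := by
      simp only [List.length_append, List.length_cons, List.length_nil]
      omega
    rw [PySem.List.pyGetD_eq_getElem _ _ h0 h1]
    have hlt : l.length - 1 < l.length := by omega
    rw [pvGetLastD_eq l h hlt]
    have hnn : ((l.length : Int) - 1).toNat < l.length := by omega
    rw [List.getElem_append_left hnn]
    congr 1
    omega
  rw [hxa, hxb]

theorem pvIdx_eq_pvAmax (l : List Int) : pvIdx l = pvAmax l := by
  induction l using List.reverseRecOn with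
  | nil => rfl
  | append_singleton l x ih =>
      cases l with
      | nil =>
          unfold pvIdx pvAmax
          simp [PySem.List.pyRange_one_eq_nil]
      | cons a t =>
          rw [pvIdx_snoc _ x (by simp), pvAmax_snoc _ x (by simp), ih]

-- a list whose elements change Boolean colour somewhere has an adjacent colour change
theorem pvAdjChange : ∀ (p : List Int) (R : Int → Bool),
    (∃ u ∈ p, R u = true) → (∃ v ∈ p, R v = false) →
    ∃ ab ∈ p.zip p.tail, R ab.1 ≠ R ab.2 := by
  intro p
  induction p with
  | nil => intro R hT hF; simp at hT
  | cons a t ih =>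
      intro R hT hF
      cases t with
      | nil =>
          rcases hT with ⟨u, hu, hut⟩; rcases hF with ⟨v, hv, hvf⟩
          simp at hu hv; subst hu; subst hv; rw [hut] at hvf; cases hvf
      | cons b t' =>
          by_cases hab : R a = R b
          · have hT' : ∃ u ∈ b :: t', R u = true := by
              rcases hT with ⟨u, hu, hut⟩
              rcases List.mem_cons.1 hu with h | h
              · exact ⟨b, List.mem_cons_self, by rw [← hab, ← h]; exact hut⟩
              · exact ⟨u, h, hut⟩
            have hF' : ∃ v ∈ b :: t', R v = false := by
              rcases hF with ⟨v, hv, hvf⟩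
              rcases List.mem_cons.1 hv with h | h
              · exact ⟨b, List.mem_cons_self, by rw [← hab, ← h]; exact hvf⟩
              · exact ⟨v, h, hvf⟩
            rcases ih R hT' hF' with ⟨ab, hmem, hne⟩
            refine ⟨ab, ?_, hne⟩
            simp only [List.tail_cons, List.zip_cons_cons] at hmem ⊢
            exact List.mem_cons_of_mem _ hmem
          · refine ⟨(a, b), ?_, hab⟩
            simp

theorem pvPairwise_zip_tail : ∀ (l : List Int), l.Pairwise (· ≤ ·) →
    ∀ ab ∈ l.zip l.tail, ab.1 ≤ ab.2 := by
  intro l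
  induction l with
  | nil => intro _ ab h; simp at h
  | cons a t ih =>
      intro hp ab hab
      cases t with
      | nil => simp at hab
      | cons b t' =>
          simp only [List.tail_cons, List.zip_cons_cons, List.mem_cons] at hab
          rcases hab with h | h
          · subst h; exact (List.pairwise_cons.1 hp).1 b List.mem_cons_self
          · exact ih (List.pairwise_cons.1 hp).2 ab h

theorem pvZip_tail_split : ∀ (l : List Int) (ab : Int × Int), ab ∈ l.zip l.tail →
    ∃ l₁ l₂, l = l₁ ++ ab.1 :: ab.2 :: l₂ := by
  intro l
  induction l with
  | nil => intro ab h; simp at h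
  | cons a t ih =>
      intro ab hab
      cases t with
      | nil => simp at hab
      | cons b t' =>
          simp only [List.tail_cons, List.zip_cons_cons, List.mem_cons] at hab
          rcases hab with h | h
          · exact ⟨[], t', by subst h; rfl⟩
          · rcases ih ab h with ⟨l₁, l₂, heq⟩
            exact ⟨a :: l₁, l₂, by rw [List.cons_append, heq]⟩

theorem pvAmax_nonneg (p : List Int) : 0 ≤ pvAmax p :=
  (PySem.List.le_foldl_max_int (p.zip p.tail) (fun ab => |ab.2 - ab.1|) 0).1

theorem pvAmax_ge_mem (p : List Int) (ab : Int × Int) (h : ab ∈ p.zip p.tail) :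
    |ab.2 - ab.1| ≤ pvAmax p :=
  (PySem.List.le_foldl_max_int (p.zip p.tail) (fun ab => |ab.2 - ab.1|) 0).2 ab h

theorem pvAmax_attained (s : List Int) :
    pvAmax s = 0 ∨ ∃ ab ∈ s.zip s.tail, pvAmax s = |ab.2 - ab.1| := by
  have hmap : pvAmax s = ((s.zip s.tail).map (fun ab => |ab.2 - ab.1|)).foldl max 0 := by
    rw [List.foldl_map]; rfl
  rcases PySem.List.foldl_max_mem ((s.zip s.tail).map (fun ab => |ab.2 - ab.1|)) 0 with h | h
  · exact Or.inl (by rw [hmap, h])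
  · rcases List.mem_map.1 h with ⟨ab, hab, heq⟩
    exact Or.inr ⟨ab, hab, by rw [hmap, ← heq]⟩

-- the key bound: any permutation's max adjacent gap is at least the sorted list's
theorem pvAmax_ge (s p : List Int) (hs : s.Pairwise (· ≤ ·)) (hp : p.Perm s) :
    pvAmax s ≤ pvAmax p := by
  rcases pvAmax_attained s with h0 | ⟨ab, habmem, habeq⟩
  · rw [h0]; exact pvAmax_nonneg p
  · obtain ⟨a, b⟩ := ab
    simp only at habeq
    have hle : a ≤ b := pvPairwise_zip_tail s hs (a, b) habmem
    have habs : pvAmax s = b - a := by rw [habeq, abs_of_nonneg (by omega)]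
    by_cases htriv : b - a ≤ 0
    · calc pvAmax s = b - a := habs
        _ ≤ 0 := htriv
        _ ≤ pvAmax p := pvAmax_nonneg p
    · -- partition: every element of s is ≤ a or ≥ b
      rcases pvZip_tail_split s (a, b) habmem with ⟨l₁, l₂, hsplit⟩
      have hpart : ∀ x ∈ s, x ≤ a ∨ b ≤ x := by
        intro x hx
        rw [hsplit] at hx hs
        rcases List.pairwise_append.1 hs with ⟨_, hcons, hrel⟩
        rcases List.mem_append.1 hx with h | h
        · exact Or.inl (hrel x h a List.mem_cons_self)
        · rcases List.mem_cons.1 h with h | h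
          · exact Or.inl (le_of_eq h)
          · rcases List.mem_cons.1 h with h | h
            · exact Or.inr (le_of_eq h.symm)
            · exact Or.inr ((List.pairwise_cons.1 (List.pairwise_cons.1 hcons).2).1 x h)
      have ha : a ∈ s := by rw [hsplit]; simp
      have hb : b ∈ s := by rw [hsplit]; simp
      have hmem := fun x => (hp.mem_iff (a := x))
      rcases pvAdjChange p (fun x => decide (x ≤ a))
          ⟨a, (hmem a).2 ha, by simp⟩
          ⟨b, (hmem b).2 hb, by simp only [decide_eq_false_iff_not]; omega⟩
        with ⟨⟨u, v⟩, huv, hne⟩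
      have hu : u ∈ p := (List.of_mem_zip huv).1
      have hv : v ∈ p := List.mem_of_mem_tail (List.of_mem_zip huv).2
      have hup := hpart u ((hmem u).1 hu)
      have hvp := hpart v ((hmem v).1 hv)
      have hbig : b - a ≤ |v - u| := by
        simp only [Ne, decide_eq_decide] at hne
        by_cases hcu : u ≤ a
        · have hcv : ¬ v ≤ a := fun hc => hne (iff_of_true hcu hc)
          have hbv : b ≤ v := hvp.resolve_left hcv
          have habs2 := le_abs_self (v - u)
          omega
        · have hcv : v ≤ a := by
            by_contra hcv
            exact hne (iff_of_false hcu hcv)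
          have hbu : b ≤ u := hup.resolve_left hcu
          have habs2 := neg_abs_le (v - u)
          omega
      calc pvAmax s = b - a := habs
        _ ≤ |v - u| := hbig
        _ ≤ pvAmax p := pvAmax_ge_mem p (u, v) huv
-- lifting a permutation of the mapped list to a permutation of the list
theorem pvPerm_map_lift : ∀ (s' : List Int) (l : List (List Int)),
    s'.Perm (l.map pvFirst) → ∃ l' : List (List Int), l'.Perm l ∧ l'.map pvFirst = s' := by
  intro s'
  induction s' with
  | nil =>
      intro l h
      have : l.map pvFirst = [] := h.symm.eq_nil
      exact ⟨[], by rw [List.map_eq_nil_iff.1 this], rfl⟩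
  | cons a t ih =>
      intro l h
      have ha : a ∈ l.map pvFirst := h.mem_iff.1 List.mem_cons_self
      rcases List.mem_map.1 ha with ⟨x, hx, hxa⟩
      rcases List.append_of_mem hx with ⟨l₁, l₂, rfl⟩
      have hmid : (l₁ ++ x :: l₂).map pvFirst = l₁.map pvFirst ++ a :: l₂.map pvFirst := by
        rw [List.map_append, List.map_cons, hxa]
      have ht : t.Perm ((l₁ ++ l₂).map pvFirst) := by
        have h1 : (a :: t).Perm (a :: (l₁.map pvFirst ++ l₂.map pvFirst)) :=
          (h.trans (by rw [hmid])).trans List.perm_middle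
        have := h1.cons_inv
        rwa [← List.map_append] at this
      rcases ih (l₁ ++ l₂) ht with ⟨l'', hperm, hmap⟩
      exact ⟨x :: l'', (hperm.cons x).trans List.perm_middle.symm,
             by rw [List.map_cons, hmap, hxa]⟩

theorem pvEraseIdx_append (l₂ : List (List Int)) : ∀ (l₁ : List (List Int)) (x : List Int),
    (l₁ ++ x :: l₂).eraseIdx l₁.length = l₁ ++ l₂ := by
  intro l₁
  induction l₁ with
  | nil => intro x; rfl
  | cons a t ih => intro x; simp only [List.cons_append, List.length_cons, List.eraseIdx_cons_succ,
      ih x]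

-- converse of perm_of_mem_permutations for r = length
theorem pvMem_permutations_of_perm : ∀ (l' l : List (List Int)), l'.Perm l →
    l' ∈ PySem.List.permutations l l.length := by
  intro l'
  induction l' with
  | nil =>
      intro l h
      obtain rfl : l = [] := h.symm.eq_nil
      simp [PySem.List.permutations_zero]
  | cons a t ih =>
      intro l h
      have ha : a ∈ l := h.mem_iff.1 List.mem_cons_self
      rcases List.append_of_mem ha with ⟨l₁, l₂, rfl⟩
      have hlen : (l₁ ++ a :: l₂).length = t.length + 1 := by
        have := h.length_eq; simpa using this.symm
      have ht : t.Perm (l₁ ++ l₂) := (h.trans List.perm_middle).cons_inv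
      rw [hlen, PySem.List.permutations]
      apply List.mem_flatMap.2
      refine ⟨l₁.length, List.mem_range.2 (by simp), ?_⟩
      have hget : (l₁ ++ a :: l₂)[l₁.length]? = some a := by
        rw [List.getElem?_append_right (le_refl _)]
        simp
      rw [hget]
      simp only []
      apply List.mem_map.2
      refine ⟨t, ?_, rfl⟩
      rw [pvEraseIdx_append]
      have hl : (l₁ ++ l₂).length = t.length := ht.length_eq.symm
      rw [← hl]
      exact ih (l₁ ++ l₂) ht

theorem pvOptfold_some (L : List (List (List Int))) : ∀ (m : Int),
    L.foldl pvStep (some m) = some ((L.map pvG).foldl min m) := by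
  induction L with
  | nil => intro m; rfl
  | cons q T ih => intro m; simp only [List.foldl_cons, pvStep, List.map_cons]; exact ih _

theorem pvPort_eq (lst : List (List Int)) :
    slow_count_inc lst = (((PySem.List.permutations lst lst.length).foldl pvStep none).getD 0) := by
  rfl

theorem pvAlt_eq (lst : List (List Int)) :
    slow_count_inc_alt lst =
      pvAmax (PySem.List.sorted (lst.map pvFirst) (fun v => v) false) := by
  unfold slow_count_inc_alt pvAmax pvFirst
  set s := PySem.List.sorted (lst.map (fun x => PySem.List.pyGetD x 0 0)) (fun v => v) false with hs
  apply PySem.List.foldl_congr_mem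
  intro acc ab hab
  have hpair : List.Pairwise (fun a b => a ≤ b) s := by
    have := PySem.List.sorted_pairwise (lst.map (fun x => PySem.List.pyGetD x 0 0)) (fun v => v)
    simpa [hs] using this
  have := pvPairwise_zip_tail s hpair ab hab
  rw [abs_of_nonneg (by omega)]

theorem pvG_amax (p : List (List Int)) : pvG p = pvAmax (p.map pvFirst) := by
  rw [pvG_eq_pvIdx, pvIdx_eq_pvAmax]

theorem pvMain (lst : List (List Int)) : slow_count_inc lst = slow_count_inc_alt lst := by
  have hsortedP := PySem.List.sorted_perm (lst.map pvFirst) (fun v => v) false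
  set s := PySem.List.sorted (lst.map pvFirst) (fun v => v) false with hsdef
  have hspair : s.Pairwise (· ≤ ·) := by
    have := PySem.List.sorted_pairwise (lst.map pvFirst) (fun v => v)
    simpa [hsdef] using this
  set perms := PySem.List.permutations lst lst.length with hperms
  have hself : lst ∈ perms := pvMem_permutations_of_perm lst lst (List.Perm.refl lst)
  obtain ⟨q0, T, hPT⟩ : ∃ q0 T, perms = q0 :: T := by
    cases hp : perms with
    | nil => rw [hp] at hself; cases hself
    | cons q0 T => exact ⟨q0, T, rfl⟩
  have hA : slow_count_inc lst = (T.map pvG).foldl min (pvG q0) := by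
    rw [pvPort_eq, ← hperms, hPT]
    simp only [List.foldl_cons, pvStep]
    rw [pvOptfold_some, Option.getD_some]
  -- every member of perms has pvAmax at least pvAmax s
  have hlb : ∀ p ∈ perms, pvAmax s ≤ pvG p := by
    intro p hp
    have hpl : p.Perm lst := PySem.List.perm_of_mem_permutations (by rw [← hperms]; exact hp)
    have hps : (p.map pvFirst).Perm s := (hpl.map pvFirst).trans hsortedP.symm
    rw [pvG_amax]
    exact pvAmax_ge s (p.map pvFirst) hspair hps
  -- some member of perms attains pvAmax s
  obtain ⟨q, hqperm, hqmap⟩ := pvPerm_map_lift s lst hsortedP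
  have hqmem : q ∈ perms := pvMem_permutations_of_perm q lst hqperm
  have hub : (T.map pvG).foldl min (pvG q0) ≤ pvAmax s := by
    have hqval : pvG q = pvAmax s := by rw [pvG_amax, hqmap]
    rw [hPT] at hqmem
    rcases List.mem_cons.1 hqmem with h | h
    · rw [← hqval, h]; exact (PySem.List.foldl_min_le (T.map pvG) (pvG q0)).1
    · rw [← hqval]
      exact (PySem.List.foldl_min_le (T.map pvG) (pvG q0)).2 (pvG q) (List.mem_map_of_mem h)
  have hlb' : pvAmax s ≤ (T.map pvG).foldl min (pvG q0) := by
    rcases PySem.List.foldl_min_mem (T.map pvG) (pvG q0) with h | h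
    · rw [h]; exact hlb q0 (by rw [hPT]; exact List.mem_cons_self)
    · rcases List.mem_map.1 h with ⟨p, hpT, hpv⟩
      rw [← hpv]; exact hlb p (by rw [hPT]; exact List.mem_cons_of_mem _ hpT)
  rw [hA, pvAlt_eq, ← hsdef]
  omega

-- ===== VERDICT (by name: the statement is the Claim_ definition above) =====
theorem slow_count_inc_spec : Claim_equal_slow_count_inc := by
  intro lst _ _
  unfold Spec_slow_count_inc
  exact pvMain lst
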